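-- pv_equiv track=rewrite | github.com/eidiculla05/Coding-Projects | Dictionaries and Lists.py | has_hoagie
-- ===== SOURCE A (Python) =====
-- def has_hoagie(num):
--     """
--         >>> has_hoagie(737)
--         True
--         >>> has_hoagie(35)
--         False
--         >>> has_hoagie(-6060)
--         True
--         >>> has_hoagie(-111)
--         True
--         >>> has_hoagie(6945)
--         False
--     """
--     #- YOUR CODE STARTS HERE
--     if num < 0:  # If a number is negative, the absolute value of the numer is taken
--         num = abs(num)
--
--     list = []  # Initializess a list to store the digits of the number
--
--
--     while num > 0:  # Extracts the digits of the number and stores them in the list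
--         list.append(num % 10)
--         num //= 10
--
--
--     for i in range(1, len(list) - 1): # Checks for duplicates to the left and right
--         if list[i-1] == list[i + 1]:
--             return True
--
--     return False
--
--
--
--
--     pass
-- ===== SOURCE B (Python) =====
-- def has_hoagie(num):
--     # Stream over the digits arithmetically: digit k equals digit k+2
--     # iff n % 10 == n // 100 % 10 for n = abs(num) // 10**k.
--     n = abs(num)
--     while n >= 100:
--         if n % 10 == n // 100 % 10:
--             return True
--         n //= 10
--     return False
-- ===== Notes on version B (the rewrite author's own statement) =====
-- stated objective: simpler
-- what changed: B streams over the number itself, comparing digit k with digit k+2 via n % 10 == n // 100 % 10 while halting at n < 100, eliminating A's intermediate digit list and the index loop over range(1, len-1).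
import Mathlib
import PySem

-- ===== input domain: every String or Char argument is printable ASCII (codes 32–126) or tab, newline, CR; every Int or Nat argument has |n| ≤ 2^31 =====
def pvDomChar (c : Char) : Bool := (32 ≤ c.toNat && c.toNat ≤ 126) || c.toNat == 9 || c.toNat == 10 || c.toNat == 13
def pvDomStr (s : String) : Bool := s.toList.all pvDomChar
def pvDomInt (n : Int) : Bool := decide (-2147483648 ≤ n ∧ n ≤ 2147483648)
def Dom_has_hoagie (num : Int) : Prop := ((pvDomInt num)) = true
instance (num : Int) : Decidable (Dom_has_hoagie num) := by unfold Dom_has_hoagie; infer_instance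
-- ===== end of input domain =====

-- B replaces A's digit-list building plus index loop by a single constant-space arithmetic
-- stream over the number, comparing digit k with digit k+2 (objective: simpler).

-- ===== PORT A =====
-- A's while-loop collecting num % 10 and then num //= 10 into `list`
def pvDigitsA (n : Int) : List Int :=
  if h : 0 < n then
    PySem.Int.mod n 10 :: pvDigitsA (PySem.Int.floordiv n 10)
  else []
termination_by n.toNat
decreasing_by
  have h10 : PySem.Int.floordiv n 10 = n / 10 := PySem.Int.floordiv_eq_ediv_of_pos (by omega)
  rw [h10]; omega

def has_hoagie (num : Int) : Bool :=
  -- if num < 0: num = abs(num)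
  let num := if num < 0 then |num| else num
  let ds := pvDigitsA num
  -- for i in range(1, len(list) - 1): if list[i-1] == list[i+1]: return True / return False
  (PySem.List.pyRange 1 (PySem.List.len ds - 1) 1).any fun i =>
    PySem.List.pyGet? ds (i - 1) == PySem.List.pyGet? ds (i + 1)

-- ===== PORT B =====
-- Source B's 'while n >= 100' loop
def pvAltLoop (n : Int) : Bool :=
  if h : 100 ≤ n then
    if PySem.Int.mod n 10 == PySem.Int.mod (PySem.Int.floordiv n 100) 10 then true
    else pvAltLoop (PySem.Int.floordiv n 10)
  else false
termination_by n.toNat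
decreasing_by
  have h10 : PySem.Int.floordiv n 10 = n / 10 := PySem.Int.floordiv_eq_ediv_of_pos (by omega)
  rw [h10]; omega

def has_hoagie_alt (num : Int) : Bool := pvAltLoop |num|

-- ===== PRECONDITION & SPEC =====
def Spec_has_hoagie (num : Int) (out : Bool) : Prop := out = has_hoagie_alt num
instance (num : Int) (out : Bool) : Decidable (Spec_has_hoagie num out) := by unfold Spec_has_hoagie; infer_instance

-- ===== CLAIM (what is proved, stated in full; the proofs are below) =====
def Claim_equal_has_hoagie : Prop := ∀ (num : Int), Dom_has_hoagie num → Spec_has_hoagie num (has_hoagie num)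

-- ===== LEMMAS AND PROOFS =====

-- common intermediate: "some digit equals the digit two places further on"
def pvListCheck : List Int → Bool
  | a :: b :: c :: t => a == c || pvListCheck (b :: c :: t)
  | _ => false

theorem pvListCheck_iff (ds : List Int) :
    pvListCheck ds = true ↔ ∃ (k : Nat) (h : k + 2 < ds.length), ds[k] = ds[k + 2] := by
  fun_induction pvListCheck ds with
  | case1 a b c t ih =>
    simp only [Bool.or_eq_true, beq_iff_eq, ih]
    constructor
    · rintro (h | ⟨k, hk, he⟩)
      · exact ⟨0, by simp, by simpa using h⟩
      · refine ⟨k + 1, ?_, ?_⟩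
        · simp only [List.length_cons] at hk ⊢; omega
        · simpa using he
    · rintro ⟨k, hk, he⟩
      match k with
      | 0 => exact Or.inl (by simpa using he)
      | k + 1 =>
        right
        refine ⟨k, by simp only [List.length_cons] at hk ⊢; omega, ?_⟩
        simpa using he
  | case2 ds h =>
    constructor
    · intro hh
      exfalso
      rcases ds with _ | ⟨a, _ | ⟨b, _ | ⟨c, t⟩⟩⟩
      · simp [pvListCheck] at hh
      · simp [pvListCheck] at hh
      · simp [pvListCheck] at hh
      · exact h a b c t rfl
    · rintro ⟨k, hk, he⟩
      exfalso
      rcases ds with _ | ⟨a, _ | ⟨b, _ | ⟨c, t⟩⟩⟩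
      · simp at hk
      · simp only [List.length_cons, List.length_nil] at hk; omega
      · simp only [List.length_cons, List.length_nil] at hk; omega
      · exact h a b c t rfl

theorem anyRange_eq_listCheck (ds : List Int) :
    ((PySem.List.pyRange 1 (PySem.List.len ds - 1) 1).any fun i =>
      PySem.List.pyGet? ds (i - 1) == PySem.List.pyGet? ds (i + 1)) = pvListCheck ds := by
  rw [Bool.eq_iff_iff, pvListCheck_iff]
  simp only [List.any_eq_true, beq_iff_eq]
  constructor
  · rintro ⟨i, hi, he⟩
    rw [PySem.List.mem_pyRange_one] at hi
    rw [PySem.List.len_eq] at hi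
    obtain ⟨h1, h2⟩ := hi
    have hm : PySem.List.pyGet? ds (i - 1) = some ds[(i-1).toNat] :=
      PySem.List.pyGet?_eq_some_getElem ds (by omega) (by omega)
    have hp : PySem.List.pyGet? ds (i + 1) = some ds[(i+1).toNat] :=
      PySem.List.pyGet?_eq_some_getElem ds (by omega) (by omega)
    rw [hm, hp] at he
    refine ⟨(i-1).toNat, by omega, ?_⟩
    injection he with he2
    have hk2 : (i+1).toNat = (i-1).toNat + 2 := by omega
    simp only [hk2] at he2
    exact he2
  · rintro ⟨k, hk, he⟩
    refine ⟨(k : Int) + 1, ?_, ?_⟩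
    · rw [PySem.List.mem_pyRange_one, PySem.List.len_eq]; constructor <;> omega
    · have hm : (k : Int) + 1 - 1 = (k : Nat) := by omega
      have hp : (k : Int) + 1 + 1 = ((k + 2 : Nat) : Int) := by omega
      rw [hm, hp, PySem.List.pyGet?_natCast, PySem.List.pyGet?_natCast,
        List.getElem?_eq_getElem hk, List.getElem?_eq_getElem (by omega), he]

theorem digitsA_expand (n : Int) (h : 100 ≤ n) :
    pvDigitsA n = PySem.Int.mod n 10 :: PySem.Int.mod (n / 10) 10 ::
      PySem.Int.mod (n / 100) 10 :: pvDigitsA (n / 100 / 10) := by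
  have e1 : PySem.Int.floordiv n 10 = n / 10 := PySem.Int.floordiv_eq_ediv_of_pos (by omega)
  have e2 : PySem.Int.floordiv (n / 10) 10 = n / 100 := by
    rw [PySem.Int.floordiv_eq_ediv_of_pos (by omega)]; omega
  have e3 : PySem.Int.floordiv (n / 100) 10 = n / 100 / 10 := PySem.Int.floordiv_eq_ediv_of_pos (by omega)
  rw [pvDigitsA]; rw [dif_pos (by omega), e1]
  rw [pvDigitsA]; rw [dif_pos (by omega), e2]
  rw [pvDigitsA]; rw [dif_pos (by omega), e3]

theorem digitsA_expand2 (m : Int) (h : 10 ≤ m) :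
    pvDigitsA m = PySem.Int.mod m 10 :: PySem.Int.mod (m / 10) 10 :: pvDigitsA (m / 10 / 10) := by
  have e1 : PySem.Int.floordiv m 10 = m / 10 := PySem.Int.floordiv_eq_ediv_of_pos (by omega)
  have e2 : PySem.Int.floordiv (m / 10) 10 = m / 10 / 10 := PySem.Int.floordiv_eq_ediv_of_pos (by omega)
  rw [pvDigitsA]; rw [dif_pos (by omega), e1]
  rw [pvDigitsA]; rw [dif_pos (by omega), e2]

theorem digitsA_short (n : Int) (h : n < 100) : (pvDigitsA n).length ≤ 2 := by
  rw [pvDigitsA]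
  split
  · rename_i h1
    have e1 : PySem.Int.floordiv n 10 = n / 10 := PySem.Int.floordiv_eq_ediv_of_pos (by omega)
    rw [e1, pvDigitsA]
    split
    · rename_i h2
      have e2 : PySem.Int.floordiv (n / 10) 10 = n / 10 / 10 := PySem.Int.floordiv_eq_ediv_of_pos (by omega)
      rw [e2, pvDigitsA, dif_neg (by omega)]
      simp
    · simp
  · simp

theorem listCheck_short (ds : List Int) (h : ds.length ≤ 2) : pvListCheck ds = false := by
  rcases ds with _ | ⟨a, _ | ⟨b, _ | ⟨c, t⟩⟩⟩ <;> first | rfl | (simp at h)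

theorem altLoop_eq_listCheck (n : Int) : pvAltLoop n = pvListCheck (pvDigitsA n) := by
  fun_induction pvAltLoop n with
  | case1 n h hbeq =>
    have e2 : PySem.Int.floordiv n 100 = n / 100 := PySem.Int.floordiv_eq_ediv_of_pos (by omega)
    rw [digitsA_expand n h, pvListCheck]
    rw [e2] at hbeq
    simp only [hbeq, Bool.true_or]
  | case2 n h hbeq ih =>
    have e1 : PySem.Int.floordiv n 10 = n / 10 := PySem.Int.floordiv_eq_ediv_of_pos (by omega)
    have e2 : PySem.Int.floordiv n 100 = n / 100 := PySem.Int.floordiv_eq_ediv_of_pos (by omega)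
    have hb' : (PySem.Int.mod n 10 == PySem.Int.mod (n / 100) 10) = false := by
      rw [e2] at hbeq; simpa using hbeq
    rw [e1] at ih
    rw [digitsA_expand n h, pvListCheck, hb', Bool.false_or]
    rw [e1, ih, digitsA_expand2 (n / 10) (by omega),
      show n / 10 / 10 = n / 100 by omega]
  | case3 n h =>
    rw [listCheck_short _ (digitsA_short n (by omega))]

-- ===== VERDICT (by name: the statement is the Claim_ definition above) =====
theorem has_hoagie_spec : Claim_equal_has_hoagie := by
  intro num _
  show _ = _
  unfold has_hoagie has_hoagie_alt
  have habs : (if num < 0 then |num| else num) = |num| := by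
    rcases lt_or_ge num 0 with h | h
    · simp [h]
    · simp [not_lt.mpr h, abs_of_nonneg h]
  rw [habs, anyRange_eq_listCheck, altLoop_eq_listCheck]
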